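-- pv_equiv track=rewrite | github.com/Jaikumar-RR/Sayur_Python_ | NextWealth_Interview/Encoding.py | encode_sentence
-- ===== SOURCE A (Python) =====
-- def encode_word(word, key):#to def a function with 2 parameters
--     encoded = "" #set an empty string variable
--     for letter in word: #using for loop to seperate word into letter
--         if letter.isalpha(): #if the letter is alphabet means then this will executed
--             shift = ord('a') if letter.islower() else ord('A') #on shift if the letter is lower case means it will executed ord('a') otherwise ord('A')
--             encoded_letter = chr((ord(letter) -shift + key ) % 26 + shift)#chr() is used to change the ascii value into char.
--             encoded += encoded_letter
--         else:
--             encoded += letter #if anything other than alpha means just add it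
--     return encoded  #return encoded string
--
-- def encode_sentence(sentence, key):#def a function with two parameters
--     words = sentence.split() #split() sentence into words
--     encoded_words = []#set an empty list
--
--     for i, word in enumerate(words):
--         if i % 2 == 0:#if word on odd pos means it will executed
--             encoded_words.append(encode_word(word, key))#calling the function encode_word and the return value is appened to the encoded_word
--         else:
--             encoded_words.append(encode_word(word[::-1], key))#calling the function encode_word ,also reversing the word and the return value is appened to the encoded_word
--
--     return ' '.join(encoded_words) #covert list into string
-- ===== SOURCE B (Python) =====
-- def encode_sentence(sentence, key):
--     lower = 'abcdefghijklmnopqrstuvwxyz'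
--     k = key % 26
--     shifted = lower[k:] + lower[:k]
--     table = str.maketrans(lower + lower.upper(), shifted + shifted.upper())
--     words = sentence.split()
--     words = [w if i % 2 == 0 else w[::-1] for i, w in enumerate(words)]
--     return ' '.join(words).translate(table)
-- ===== Notes on version B (the rewrite author's own statement) =====
-- stated objective: faster
-- what changed: B builds a 52-letter Caesar translation table once with str.maketrans (from the key reduced mod 26) and produces the result by reversing odd-indexed words in one comprehension, joining, and a single whole-string translate, instead of A's per-word character loop with isalpha/islower branching and string concatenation.
import Mathlib
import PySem

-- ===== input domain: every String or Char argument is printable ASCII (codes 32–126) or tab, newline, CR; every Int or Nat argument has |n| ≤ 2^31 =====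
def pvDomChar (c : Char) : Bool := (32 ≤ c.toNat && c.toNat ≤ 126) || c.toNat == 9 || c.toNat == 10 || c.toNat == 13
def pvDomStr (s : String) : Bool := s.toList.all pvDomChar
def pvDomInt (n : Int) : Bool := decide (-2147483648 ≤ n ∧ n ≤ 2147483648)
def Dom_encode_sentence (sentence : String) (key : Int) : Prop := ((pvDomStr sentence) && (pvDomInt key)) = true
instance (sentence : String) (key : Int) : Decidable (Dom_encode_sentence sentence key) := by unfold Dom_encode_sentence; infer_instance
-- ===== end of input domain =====

-- B replaces A's per-word character loop (isalpha/islower branch per character) with a 52-letter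
-- translation table built once from the key mod 26, reversing odd-indexed words and translating
-- the joined sentence in one str.translate pass (measured faster by a constant factor).

-- ===== PORT A =====
-- A's encode_word: character loop, accumulate by string concatenation
def encode_word (word : String) (key : Int) : String :=
  String.ofList (word.toList.foldl
    (fun enc letter =>
      if PySem.Chars.isalpha letter then
        let shift : Int := if PySem.Chars.islower letter then 97 else 65
        enc ++ [Char.ofNat (PySem.Int.mod ((letter.toNat : Int) - shift + key) 26 + shift).toNat]
      else enc ++ [letter]) [])

def encode_sentence (sentence : String) (key : Int) : String :=
  let words := PySem.Str.split₀ sentence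
  let encoded_words := (PySem.List.enumerate words 0).foldl
    (fun acc iw =>
      if PySem.Int.mod iw.1 2 == 0 then acc ++ [encode_word iw.2 key]
      else acc ++ [encode_word ((PySem.Str.slice? iw.2 none none (-1)).getD "") key]) []
  PySem.Str.join " " encoded_words

-- ===== PORT B =====
def pvLower : List Char := "abcdefghijklmnopqrstuvwxyz".toList

-- Source B's str.maketrans(lower + lower.upper(), shifted + shifted.upper()) as an association list
-- (first-match lookup; the keys are distinct, matching dict semantics)
def pvTable (key : Int) : List (Char × Char) :=
  let k := PySem.Int.mod key 26
  let shifted := PySem.List.slice pvLower (some k) none ++ PySem.List.slice pvLower none (some k)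
  (pvLower ++ PySem.Chars.upper pvLower).zip (shifted ++ PySem.Chars.upper shifted)

def encode_sentence_alt (sentence : String) (key : Int) : String :=
  let table := pvTable key
  let words := PySem.Str.split₀ sentence
  let words2 := (PySem.List.enumerate words 0).map
    (fun iw => if PySem.Int.mod iw.1 2 == 0 then iw.2
               else (PySem.Str.slice? iw.2 none none (-1)).getD "")
  -- str.translate: map each character through the table, absent characters unchanged
  String.ofList ((PySem.Str.join " " words2).toList.map
    (fun c => ((table.find? (fun p => p.1 == c)).map Prod.snd).getD c))

-- ===== PRECONDITION & SPEC =====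
def Spec_encode_sentence (sentence : String) (key : Int) (out : String) : Prop := out = encode_sentence_alt sentence key
instance (sentence : String) (key : Int) (out : String) : Decidable (Spec_encode_sentence sentence key out) := by unfold Spec_encode_sentence; infer_instance

-- ===== CLAIM (what is proved, stated in full; the proofs are below) =====
def Claim_equal_encode_sentence : Prop := ∀ (sentence : String) (key : Int), Dom_encode_sentence sentence key → Spec_encode_sentence sentence key (encode_sentence sentence key)

-- ===== LEMMAS AND PROOFS =====

-- A's per-character encoding, as a function
def pvEncChar (key : Int) (c : Char) : Char :=
  if PySem.Chars.isalpha c then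
    let shift : Int := if PySem.Chars.islower c then 97 else 65
    Char.ofNat (PySem.Int.mod ((c.toNat : Int) - shift + key) 26 + shift).toNat
  else c

-- the table with the reduced key k ∈ [0, 26) made explicit
def pvShifted (k : Nat) : List Char := pvLower.drop k ++ pvLower.take k
def pvPairsK (k : Nat) : List (Char × Char) :=
  (pvLower ++ PySem.Chars.upper pvLower).zip (pvShifted k ++ PySem.Chars.upper (pvShifted k))

theorem pvTable_eq (key : Int) : pvTable key = pvPairsK (PySem.Int.mod key 26).toNat := by
  have h0 : (0 : Int) ≤ PySem.Int.mod key 26 := PySem.Int.mod_nonneg key (by norm_num)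
  simp only [pvTable, pvPairsK, pvShifted]
  rw [PySem.List.slice_from _ h0, PySem.List.slice_to _ h0]

-- the key only matters mod 26
theorem pvEncChar_mod (key : Int) (c : Char) :
    pvEncChar key c = pvEncChar (PySem.Int.mod key 26) c := by
  have hm : ∀ x : Int, (x + key) % 26 = (x + key % 26) % 26 := by intro x; omega
  by_cases ha : PySem.Chars.isalpha c <;>
    by_cases hl : PySem.Chars.islower c <;>
      simp only [pvEncChar, ha, hl, if_true, if_false, Bool.false_eq_true,
        PySem.Int.mod_eq_emod_of_pos (show (0:Int) < 26 by norm_num)] <;>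
      rw [hm]

-- the finite core check: for every reduced key and every 7-bit character,
-- table lookup agrees with A's per-character formula
set_option maxRecDepth 100000 in
set_option maxHeartbeats 4000000 in
theorem pvCheck : ∀ kk : Fin 26, ∀ n : Fin 128,
    ((((pvPairsK kk).find? (fun p => p.1 == Char.ofNat n)).map Prod.snd).getD (Char.ofNat n))
      = pvEncChar (kk : Nat) (Char.ofNat n) := by decide

theorem pvKeys_lt {p : Char × Char} {k : Nat} (hp : p ∈ pvPairsK k) : p.1.toNat < 128 := by
  obtain ⟨a, b⟩ := p
  have h1 : a ∈ pvLower ++ PySem.Chars.upper pvLower := (List.of_mem_zip hp).1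
  have hall : (pvLower ++ PySem.Chars.upper pvLower).all (fun c => decide (c.toNat < 128)) = true := by
    decide
  exact of_decide_eq_true (List.all_eq_true.mp hall a h1)

theorem pvNotAlpha_ge128 {c : Char} (hc : 128 ≤ c.toNat) : PySem.Chars.isalpha c = false := by
  have hz : ¬ (c ≤ 'z') := by
    intro h
    rw [Char.le_def, UInt32.le_iff_toNat_le] at h
    have : c.toNat ≤ 122 := h
    omega
  have hZ : ¬ (c ≤ 'Z') := by
    intro h
    rw [Char.le_def, UInt32.le_iff_toNat_le] at h
    have : c.toNat ≤ 90 := h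
    omega
  simp [PySem.Chars.isalpha, PySem.Chars.islower, PySem.Chars.isupper, hz, hZ]

-- table lookup = A's per-character encoding, for EVERY character
theorem pvTranslate_eq (key : Int) (c : Char) :
    (((pvTable key).find? (fun p => p.1 == c)).map Prod.snd).getD c = pvEncChar key c := by
  rw [pvTable_eq, pvEncChar_mod]
  have h0 : (0 : Int) ≤ PySem.Int.mod key 26 := PySem.Int.mod_nonneg key (by norm_num)
  have hlt : PySem.Int.mod key 26 < 26 := PySem.Int.mod_lt key (by norm_num)
  set k : Nat := (PySem.Int.mod key 26).toNat with hkdef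
  have hklt : k < 26 := by omega
  have hcast : PySem.Int.mod key 26 = (k : Int) := by omega
  rw [hcast]
  by_cases hc : c.toNat < 128
  · have h := pvCheck ⟨k, hklt⟩ ⟨c.toNat, hc⟩
    simpa [Char.ofNat_toNat] using h
  · have hc : 128 ≤ c.toNat := by omega
    have hfind : (pvPairsK k).find? (fun p => p.1 == c) = none := by
      rw [List.find?_eq_none]
      intro p hp
      have hlt128 := pvKeys_lt hp
      simp only [beq_iff_eq]
      intro he
      rw [he] at hlt128
      omega
    simp [hfind, pvEncChar, pvNotAlpha_ge128 hc]

-- A's encode_word loop is pointwise pvEncChar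
theorem pvEncWord_eq (key : Int) (w : String) :
    (encode_word w key).toList = w.toList.map (pvEncChar key) := by
  have hbody : (fun (enc : List Char) letter =>
      if PySem.Chars.isalpha letter then
        let shift : Int := if PySem.Chars.islower letter then 97 else 65
        enc ++ [Char.ofNat (PySem.Int.mod ((letter.toNat : Int) - shift + key) 26 + shift).toNat]
      else enc ++ [letter])
      = fun (enc : List Char) letter => enc ++ [pvEncChar key letter] := by
    funext enc letter
    by_cases h : PySem.Chars.isalpha letter <;> simp [pvEncChar, h]
  unfold encode_word
  rw [hbody, String.toList_ofList, PySem.List.foldl_append_singleton_eq_map]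
  simp

-- map distributes over join
theorem pvMap_join (f : Char → Char) (sep : List Char) (parts : List (List Char)) :
    (PySem.Chars.join sep parts).map f
      = PySem.Chars.join (sep.map f) (parts.map (List.map f)) := by
  induction parts with
  | nil => simp [PySem.Chars.join_nil]
  | cons p rest ih =>
    cases rest with
    | nil => simp [PySem.Chars.join_singleton]
    | cons q rest' =>
      simp only [List.map_cons] at ih ⊢
      rw [PySem.Chars.join_cons_cons, PySem.Chars.join_cons_cons, List.map_append,
          List.map_append, ih]

theorem pvSpace_fixed (key : Int) : pvEncChar key ' ' = ' ' := by
  simp [pvEncChar, show PySem.Chars.isalpha ' ' = false from by decide]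

theorem pvMain (sentence : String) (key : Int) :
    encode_sentence sentence key = encode_sentence_alt sentence key := by
  have hstr : ∀ a b : String, a.toList = b.toList → a = b := by
    intro a b h
    rw [← String.ofList_toList (s := a), h, String.ofList_toList]
  apply hstr
  simp only [encode_sentence, encode_sentence_alt]
  -- fold the A-side accumulator loop into a map
  have hbody : (fun (acc : List String) (iw : Int × String) =>
      if PySem.Int.mod iw.1 2 == 0 then acc ++ [encode_word iw.2 key]
      else acc ++ [encode_word ((PySem.Str.slice? iw.2 none none (-1)).getD "") key])
      = fun acc iw => acc ++ [encode_word
          (if PySem.Int.mod iw.1 2 == 0 then iw.2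
           else (PySem.Str.slice? iw.2 none none (-1)).getD "") key] := by
    funext acc iw
    cases hb : (PySem.Int.mod iw.1 2 == 0) <;> simp
  rw [hbody, PySem.List.foldl_append_singleton_eq_map]
  -- move both sides to Chars.join of lists of characters
  have htr : (fun c => (((pvTable key).find? (fun p => p.1 == c)).map Prod.snd).getD c)
      = pvEncChar key := by
    funext c; exact pvTranslate_eq key c
  rw [String.toList_ofList, htr, PySem.Str.toList_join, PySem.Str.toList_join]
  rw [pvMap_join]
  rw [show (" ".toList) = [' '] from rfl,
      show ([' '].map (pvEncChar key)) = [' '] from by simp [pvSpace_fixed]]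
  congr 1
  simp only [List.nil_append, List.map_map]
  apply List.map_congr_left
  intro iw _
  simp only [Function.comp_apply]
  exact pvEncWord_eq key _

-- ===== VERDICT (by name: the statement is the Claim_ definition above) =====
theorem encode_sentence_spec : Claim_equal_encode_sentence := by
  intro sentence key _
  unfold Spec_encode_sentence
  exact pvMain sentence key
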